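-- pv_equiv track=rewrite | github.com/bobroj/PP_2 | lab_3/functions1_8.py | JB
-- ===== SOURCE A (Python) =====
-- def JB (my_list):
--     n=len(my_list)
--
--     zero1=None
--     zero2=None
--     seven=None
--
--     for i in range (0, n, 1):
--         if my_list[i]==0:
--             if zero1==None:
--                 zero1=i
--
--             elif zero2==None:
--                 zero2=i
--
--         elif my_list[i]==7:
--             seven=i
--
--     if zero1!=None and zero2!=None and seven!=None and zero1<zero2<seven :
--
--         return True
--
--     return False
-- ===== SOURCE B (Python) =====
-- def JB(my_list):
--     zeros = 0
--     for i, x in enumerate(my_list):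
--         if x == 0:
--             zeros += 1
--             if zeros == 2:
--                 return 7 in my_list[i+1:]
--     return False
-- ===== Notes on version B (the rewrite author's own statement) =====
-- stated objective: simpler
-- what changed: B finds the index of the second zero with an early-exit counting scan and then just tests whether a 7 occurs in the suffix after it, instead of A's full-pass simultaneous tracking of first-zero/second-zero/last-seven indices and a final three-way index comparison.
import Mathlib
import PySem

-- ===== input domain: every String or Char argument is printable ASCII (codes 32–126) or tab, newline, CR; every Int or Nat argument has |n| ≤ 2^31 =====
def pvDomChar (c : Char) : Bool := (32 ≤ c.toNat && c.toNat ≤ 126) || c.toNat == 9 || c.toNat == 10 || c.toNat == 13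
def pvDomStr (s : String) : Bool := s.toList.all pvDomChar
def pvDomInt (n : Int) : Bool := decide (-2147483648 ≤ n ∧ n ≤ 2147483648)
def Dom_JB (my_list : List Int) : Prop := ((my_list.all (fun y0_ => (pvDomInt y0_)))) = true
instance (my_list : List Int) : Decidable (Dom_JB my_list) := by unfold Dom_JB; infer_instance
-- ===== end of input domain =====

-- B is a simpler two-phase decomposition: find the second zero, then search the suffix for a 7;
-- A tracks first-zero/second-zero/last-seven indices in one pass and compares them at the end.
-- Both are O(n); no speed claim.

-- ===== PORT A =====
-- the for-loop of A: state (zero1, zero2, seven), index i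
def JBloop : List Int → Nat → Option Nat × Option Nat × Option Nat → Option Nat × Option Nat × Option Nat
  | [], _, s => s
  | x :: rest, i, (z1, z2, sv) =>
    JBloop rest (i + 1)
      (if x == 0 then
        (if z1 = none then (some i, z2, sv)
         else if z2 = none then (z1, some i, sv)
         else (z1, z2, sv))
       else if x == 7 then (z1, z2, some i)
       else (z1, z2, sv))

def JB (my_list : List Int) : Bool :=
  match JBloop my_list 0 (none, none, none) with
  | (some z1, some z2, some sv) => decide (z1 < z2 ∧ z2 < sv)
  | _ => false

-- ===== PORT B =====
-- B's loop: count zeros; on the second zero return whether 7 occurs in the rest of the list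
def JBfind : List Int → Nat → Bool
  | [], _ => false
  | x :: rest, zeros =>
    if x == 0 then
      if zeros + 1 == 2 then rest.contains 7
      else JBfind rest (zeros + 1)
    else JBfind rest zeros

def JB_alt (my_list : List Int) : Bool := JBfind my_list 0

-- ===== PRECONDITION & SPEC =====
def Spec_JB (my_list : List Int) (out : Bool) : Prop := out = JB_alt my_list
instance (my_list : List Int) (out : Bool) : Decidable (Spec_JB my_list out) := by unfold Spec_JB; infer_instance

-- ===== CLAIM (what is proved, stated in full; the proofs are below) =====
def Claim_equal_JB : Prop := ∀ (my_list : List Int), Dom_JB my_list → Spec_JB my_list (JB my_list)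

-- ===== LEMMAS AND PROOFS =====

def JBcheck (s : Option Nat × Option Nat × Option Nat) : Bool :=
  match s with
  | (some z1, some z2, some sv) => decide (z1 < z2 ∧ z2 < sv)
  | _ => false

-- once both zeros are recorded, the final check is: a 7 occurs later, or the recorded seven is past z2
theorem JBloop_full (l : List Int) : ∀ (i z1 z2 : Nat) (sv : Option Nat),
    z1 < z2 → z2 < i →
    JBcheck (JBloop l i (some z1, some z2, sv)) =
      (l.contains 7 || sv.elim false (fun v => decide (z2 < v))) := by
  induction l with
  | nil =>
    intro i z1 z2 sv h1 h2
    cases sv <;> simp [JBloop, JBcheck, Option.elim, h1]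
  | cons x rest ih =>
    intro i z1 z2 sv h1 h2
    by_cases hx0 : x = 0
    · have h0 : (x == 0) = true := by simpa using hx0
      simp only [JBloop, List.contains_cons, h0, if_true, reduceCtorEq, if_false]
      rw [ih (i+1) z1 z2 sv h1 (by omega)]
      simp [hx0]
    · by_cases hx7 : x = 7
      · have h0 : (x == 0) = false := by simpa using hx0
        have h7 : (x == 7) = true := by simpa using hx7
        simp only [JBloop, List.contains_cons, h0, h7, Bool.false_eq_true, if_false, if_true]
        rw [ih (i+1) z1 z2 (some i) h1 (by omega)]
        simp [Option.elim, hx7, h2]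
      · have h0 : (x == 0) = false := by simpa using hx0
        have h7 : (x == 7) = false := by simpa using hx7
        simp only [JBloop, List.contains_cons, h0, h7, Bool.false_eq_true, if_false]
        rw [ih (i+1) z1 z2 sv h1 (by omega)]
        have h7' : ((7:Int) == x) = false := by rw [beq_eq_false_iff_ne]; exact fun h => hx7 h.symm
        simp [h7']

-- one zero recorded: the final check equals B's scan with zeros = 1
theorem JBloop_one (l : List Int) : ∀ (i z1 : Nat) (sv : Option Nat),
    z1 < i → (∀ v, sv = some v → v < i) →
    JBcheck (JBloop l i (some z1, none, sv)) = JBfind l 1 := by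
  induction l with
  | nil => intro i z1 sv _ _; cases sv <;> simp [JBloop, JBcheck, JBfind]
  | cons x rest ih =>
    intro i z1 sv h1 hsv
    by_cases hx0 : x = 0
    · have h0 : (x == 0) = true := by simpa using hx0
      simp only [JBloop, JBfind, h0, if_true, if_neg (by simp : ¬ (some z1 = none))]
      rw [JBloop_full rest (i+1) z1 i sv h1 (Nat.lt_succ_self i)]
      have hel : sv.elim false (fun v => decide (i < v)) = false := by
        cases sv with
        | none => rfl
        | some v => simpa [Option.elim] using Nat.le_of_lt (hsv v rfl)
      simp [hel]
    · by_cases hx7 : x = 7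
      · have h0 : (x == 0) = false := by simpa using hx0
        have h7 : (x == 7) = true := by simpa using hx7
        simp only [JBloop, JBfind, h0, h7, Bool.false_eq_true, if_false, if_true]
        exact ih (i+1) z1 (some i) (by omega) (by intro v hv; cases hv; omega)
      · have h0 : (x == 0) = false := by simpa using hx0
        have h7 : (x == 7) = false := by simpa using hx7
        simp only [JBloop, JBfind, h0, h7, Bool.false_eq_true, if_false]
        exact ih (i+1) z1 sv (by omega) (by intro v hv; exact Nat.lt_succ_of_lt (hsv v hv))

-- no zero recorded yet: the final check equals B's scan with zeros = 0
theorem JBloop_zero (l : List Int) : ∀ (i : Nat) (sv : Option Nat),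
    (∀ v, sv = some v → v < i) →
    JBcheck (JBloop l i (none, none, sv)) = JBfind l 0 := by
  induction l with
  | nil => intro i sv _; cases sv <;> simp [JBloop, JBcheck, JBfind]
  | cons x rest ih =>
    intro i sv hsv
    by_cases hx0 : x = 0
    · have h0 : (x == 0) = true := by simpa using hx0
      simp only [JBloop, JBfind, h0, if_true]
      norm_num
      exact JBloop_one rest (i+1) i sv (Nat.lt_succ_self i)
        (by intro v hv; exact Nat.lt_succ_of_lt (hsv v hv))
    · by_cases hx7 : x = 7
      · have h0 : (x == 0) = false := by simpa using hx0
        have h7 : (x == 7) = true := by simpa using hx7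
        simp only [JBloop, JBfind, h0, h7, Bool.false_eq_true, if_false, if_true]
        exact ih (i+1) (some i) (by intro v hv; cases hv; omega)
      · have h0 : (x == 0) = false := by simpa using hx0
        have h7 : (x == 7) = false := by simpa using hx7
        simp only [JBloop, JBfind, h0, h7, Bool.false_eq_true, if_false]
        exact ih (i+1) sv (by intro v hv; exact Nat.lt_succ_of_lt (hsv v hv))

-- ===== VERDICT (by name: the statement is the Claim_ definition above) =====
theorem JB_spec : Claim_equal_JB := by
  intro my_list _
  show JB my_list = JB_alt my_list
  have h := JBloop_zero my_list 0 none (by intro v hv; cases hv)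
  simpa [JB, JBcheck, JB_alt] using h
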